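-- pv_equiv track=rewrite | github.com/harryhazza77/aws-safe-mcp | src/aws_safe_mcp/tools/sqs.py | _first_sqs_backlog_bottleneck
-- ===== SOURCE A (Python) =====
-- def _first_sqs_backlog_bottleneck(risks: list[str]) -> str | None:
--     priority = [
--         "messages_available_but_no_lambda_mapping",
--         "event_source_mapping_not_enabled",
--         "lambda_throttles_observed",
--         "visibility_timeout_too_low_for_lambda_timeout",
--         "oldest_message_age_high",
--         "partial_batch_response_not_enabled",
--         "queue_redrive_not_configured",
--     ]
--     risk_set = set(risks)
--     for risk in priority:
--         if risk in risk_set: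
--             return risk
--     return risks[0] if risks else None
-- ===== SOURCE B (Python) =====
-- _PRIORITY = [
--     "messages_available_but_no_lambda_mapping",
--     "event_source_mapping_not_enabled",
--     "lambda_throttles_observed",
--     "visibility_timeout_too_low_for_lambda_timeout",
--     "oldest_message_age_high",
--     "partial_batch_response_not_enabled",
--     "queue_redrive_not_configured",
-- ]
-- _RANK = {name: i for i, name in enumerate(_PRIORITY)}
--
--
-- def _first_sqs_backlog_bottleneck(risks: list[str]) -> str | None:
--     best = None
--     for risk in risks:
--         k = _RANK.get(risk)
--         if k is not None and (best is None or k < best):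
--             best = k
--     if best is not None:
--         return _PRIORITY[best]
--     return risks[0] if risks else None
-- ===== Notes on version B (the rewrite author's own statement) =====
-- stated objective: alternative
-- what changed: B scans the input list once keeping the minimum rank from a name-to-rank dict, instead of A's scan over the fixed priority list testing membership in a set of the risks.
import Mathlib
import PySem

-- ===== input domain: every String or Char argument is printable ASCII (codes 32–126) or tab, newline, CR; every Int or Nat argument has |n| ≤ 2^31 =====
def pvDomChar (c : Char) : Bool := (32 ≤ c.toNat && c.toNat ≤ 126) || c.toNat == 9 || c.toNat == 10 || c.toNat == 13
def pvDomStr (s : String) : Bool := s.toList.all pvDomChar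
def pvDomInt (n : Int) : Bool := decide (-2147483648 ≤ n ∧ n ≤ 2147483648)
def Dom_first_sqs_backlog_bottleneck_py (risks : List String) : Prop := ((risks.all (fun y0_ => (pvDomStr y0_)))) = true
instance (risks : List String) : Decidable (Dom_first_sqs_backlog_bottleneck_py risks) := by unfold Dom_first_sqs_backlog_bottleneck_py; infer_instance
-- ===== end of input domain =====

-- B changes the traversal: one pass over the input keeping the minimum rank from a
-- name→rank dict, instead of A's scan of the fixed priority list against a set of the risks.

-- ===== PORT A =====
def pvPriority : List String :=
  [ "messages_available_but_no_lambda_mapping",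
    "event_source_mapping_not_enabled",
    "lambda_throttles_observed",
    "visibility_timeout_too_low_for_lambda_timeout",
    "oldest_message_age_high",
    "partial_batch_response_not_enabled",
    "queue_redrive_not_configured" ]

-- 'for risk in priority: if risk in risk_set: return risk' then 'risks[0] if risks else None'
def pvLoopA (riskSet : PySem.Set String) (risks : List String) : List String → Option String
  | [] => match risks with | [] => none | r :: _ => some r
  | p :: rest => if PySem.Set.contains riskSet p then some p else pvLoopA riskSet risks rest

def first_sqs_backlog_bottleneck_py (risks : List String) : Option String :=
  pvLoopA (PySem.Set.ofList risks) risks pvPriority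

-- ===== PORT B =====
-- _RANK = {name: i for i, name in enumerate(_PRIORITY)}, written out as the assoc list it builds
def pvRank : PySem.Dict String Nat :=
  PySem.Dict.mk [ ("messages_available_but_no_lambda_mapping", 0),
    ("event_source_mapping_not_enabled", 1),
    ("lambda_throttles_observed", 2),
    ("visibility_timeout_too_low_for_lambda_timeout", 3),
    ("oldest_message_age_high", 4),
    ("partial_batch_response_not_enabled", 5),
    ("queue_redrive_not_configured", 6) ]

-- loop body: k = _RANK.get(risk); if k is not None and (best is None or k < best): best = k
def pvStep (best : Option Nat) (risk : String) : Option Nat :=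
  match PySem.Dict.get? pvRank risk with
  | none => best
  | some k =>
    match best with
    | none => some k
    | some j => if k < j then some k else some j

-- '_PRIORITY[best]' ported via pyGet?; best is always a valid index 0..6, so this is 'some _PRIORITY[best]'
def first_sqs_backlog_bottleneck_py_alt (risks : List String) : Option String :=
  match risks.foldl pvStep none with
  | some j => PySem.List.pyGet? pvPriority (j : Int)
  | none => match risks with | [] => none | r :: _ => some r

-- ===== PRECONDITION & SPEC =====
def Spec_first_sqs_backlog_bottleneck_py (risks : List String) (out : Option String) : Prop := out = first_sqs_backlog_bottleneck_py_alt risks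
instance (risks : List String) (out : Option String) : Decidable (Spec_first_sqs_backlog_bottleneck_py risks out) := by unfold Spec_first_sqs_backlog_bottleneck_py; infer_instance

-- ===== CLAIM (what is proved, stated in full; the proofs are below) =====
def Claim_equal_first_sqs_backlog_bottleneck_py : Prop := ∀ (risks : List String), Dom_first_sqs_backlog_bottleneck_py risks → Spec_first_sqs_backlog_bottleneck_py risks (first_sqs_backlog_bottleneck_py risks)

-- ===== LEMMAS AND PROOFS =====

-- ground facts about the literal rank dict / priority list
theorem pvG0 : PySem.Dict.get? pvRank "messages_available_but_no_lambda_mapping" = some 0 := by decide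
theorem pvG1 : PySem.Dict.get? pvRank "event_source_mapping_not_enabled" = some 1 := by decide
theorem pvG2 : PySem.Dict.get? pvRank "lambda_throttles_observed" = some 2 := by decide
theorem pvG3 : PySem.Dict.get? pvRank "visibility_timeout_too_low_for_lambda_timeout" = some 3 := by decide
theorem pvG4 : PySem.Dict.get? pvRank "oldest_message_age_high" = some 4 := by decide
theorem pvG5 : PySem.Dict.get? pvRank "partial_batch_response_not_enabled" = some 5 := by decide
theorem pvG6 : PySem.Dict.get? pvRank "queue_redrive_not_configured" = some 6 := by decide
theorem pvP0 : PySem.List.pyGet? pvPriority ((0:Nat) : Int) = some "messages_available_but_no_lambda_mapping" := by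
  rw [PySem.List.pyGet?_natCast]; rfl
theorem pvP1 : PySem.List.pyGet? pvPriority ((1:Nat) : Int) = some "event_source_mapping_not_enabled" := by
  rw [PySem.List.pyGet?_natCast]; rfl
theorem pvP2 : PySem.List.pyGet? pvPriority ((2:Nat) : Int) = some "lambda_throttles_observed" := by
  rw [PySem.List.pyGet?_natCast]; rfl
theorem pvP3 : PySem.List.pyGet? pvPriority ((3:Nat) : Int) = some "visibility_timeout_too_low_for_lambda_timeout" := by
  rw [PySem.List.pyGet?_natCast]; rfl
theorem pvP4 : PySem.List.pyGet? pvPriority ((4:Nat) : Int) = some "oldest_message_age_high" := by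
  rw [PySem.List.pyGet?_natCast]; rfl
theorem pvP5 : PySem.List.pyGet? pvPriority ((5:Nat) : Int) = some "partial_batch_response_not_enabled" := by
  rw [PySem.List.pyGet?_natCast]; rfl
theorem pvP6 : PySem.List.pyGet? pvPriority ((6:Nat) : Int) = some "queue_redrive_not_configured" := by
  rw [PySem.List.pyGet?_natCast]; rfl

-- inverse characterisation of the rank dict (by splitting the lookup, no string evaluation)
theorem pvRank_cases {r : String} {k : Nat} (h : PySem.Dict.get? pvRank r = some k) :
    (k = 0 ∧ r = "messages_available_but_no_lambda_mapping") ∨ (k = 1 ∧ r = "event_source_mapping_not_enabled") ∨ (k = 2 ∧ r = "lambda_throttles_observed") ∨ (k = 3 ∧ r = "visibility_timeout_too_low_for_lambda_timeout") ∨ (k = 4 ∧ r = "oldest_message_age_high") ∨ (k = 5 ∧ r = "partial_batch_response_not_enabled") ∨ (k = 6 ∧ r = "queue_redrive_not_configured") := by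
  simp only [pvRank, PySem.Dict.get?_mk_cons, beq_iff_eq] at h
  split_ifs at h with h0 h1 h2 h3 h4 h5 h6
  all_goals first
    | (injection h with hk; subst_vars; tauto)
    | exact absurd h (by simp [PySem.Dict.get?])

-- merging two partial minima
def pvMin : Option Nat → Option Nat → Option Nat
  | none, b => b
  | some j, none => some j
  | some j, some k => some (min j k)

theorem pvStep_eq_pvMin (b : Option Nat) (r : String) :
    pvStep b r = pvMin b (PySem.Dict.get? pvRank r) := by
  unfold pvStep pvMin
  cases PySem.Dict.get? pvRank r with
  | none => cases b <;> rfl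
  | some k =>
    cases b with
    | none => rfl
    | some j =>
      show (if k < j then some k else some j) = some (min j k)
      by_cases hk : k < j
      · rw [if_pos hk, Nat.min_eq_right (Nat.le_of_lt hk)]
      · rw [if_neg hk, Nat.min_eq_left (by omega)]

theorem pvMin_assoc (a b c : Option Nat) : pvMin (pvMin a b) c = pvMin a (pvMin b c) := by
  cases a <;> cases b <;> cases c <;> simp [pvMin, Nat.min_assoc]

theorem foldl_pvStep_acc (l : List String) (acc : Option Nat) :
    l.foldl pvStep acc = pvMin acc (l.foldl pvStep none) := by
  induction l generalizing acc with
  | nil => cases acc <;> rfl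
  | cons r l ih =>
    simp only [List.foldl_cons]
    rw [ih (pvStep acc r), ih (pvStep none r), pvStep_eq_pvMin, pvStep_eq_pvMin, pvMin_assoc]
    rfl

theorem foldl_pvStep_cons (r : String) (l : List String) :
    (r :: l).foldl pvStep none = pvMin (PySem.Dict.get? pvRank r) (l.foldl pvStep none) := by
  simp only [List.foldl_cons]
  rw [foldl_pvStep_acc, pvStep_eq_pvMin]
  rfl

theorem F_none {l : List String} (h : l.foldl pvStep none = none) :
    ∀ r ∈ l, PySem.Dict.get? pvRank r = none := by
  induction l with
  | nil => intro r hr; cases hr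
  | cons a l ih =>
    rw [foldl_pvStep_cons] at h
    cases ha : PySem.Dict.get? pvRank a with
    | none =>
      rw [ha] at h
      simp only [pvMin] at h
      intro r hr
      rcases List.mem_cons.mp hr with rfl | hr'
      · exact ha
      · exact ih h r hr'
    | some k =>
      rw [ha] at h
      cases hl : l.foldl pvStep none <;> rw [hl] at h <;> simp [pvMin] at h

theorem F_min {l : List String} {j : Nat} (h : l.foldl pvStep none = some j) :
    (∃ r ∈ l, PySem.Dict.get? pvRank r = some j) ∧
    (∀ r ∈ l, ∀ k, PySem.Dict.get? pvRank r = some k → j ≤ k) := by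
  induction l generalizing j with
  | nil => cases h
  | cons a l ih =>
    rw [foldl_pvStep_cons] at h
    cases ha : PySem.Dict.get? pvRank a with
    | none =>
      rw [ha] at h
      simp only [pvMin] at h
      obtain ⟨⟨r, hr, hrk⟩, hmin⟩ := ih h
      refine ⟨⟨r, List.mem_cons_of_mem _ hr, hrk⟩, ?_⟩
      intro r' hr' k hk
      rcases List.mem_cons.mp hr' with rfl | hr''
      · rw [ha] at hk; cases hk
      · exact hmin r' hr'' k hk
    | some ka =>
      rw [ha] at h
      cases hl : l.foldl pvStep none with
      | none =>
        rw [hl] at h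
        simp only [pvMin, Option.some.injEq] at h
        subst h
        refine ⟨⟨a, List.mem_cons_self .., ha⟩, ?_⟩
        intro r' hr' k hk
        rcases List.mem_cons.mp hr' with rfl | hr''
        · rw [ha] at hk; injection hk with hk; omega
        · rw [F_none hl r' hr''] at hk; cases hk
      | some jl =>
        rw [hl] at h
        simp only [pvMin, Option.some.injEq] at h
        obtain ⟨⟨r, hr, hrk⟩, hmin⟩ := ih hl
        subst h
        by_cases hle : ka ≤ jl
        · refine ⟨⟨a, List.mem_cons_self .., by rw [ha]; congr 1; omega⟩, ?_⟩
          intro r' hr' k hk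
          rcases List.mem_cons.mp hr' with rfl | hr''
          · rw [ha] at hk; injection hk with hk; omega
          · have := hmin r' hr'' k hk; omega
        · refine ⟨⟨r, List.mem_cons_of_mem _ hr, by rw [hrk]; congr 1; omega⟩, ?_⟩
          intro r' hr' k hk
          rcases List.mem_cons.mp hr' with rfl | hr''
          · rw [ha] at hk; injection hk with hk; omega
          · have := hmin r' hr'' k hk; omega

-- ===== VERDICT (by name: the statement is the Claim_ definition above) =====
theorem first_sqs_backlog_bottleneck_py_spec : Claim_equal_first_sqs_backlog_bottleneck_py := by
  intro risks _
  unfold Spec_first_sqs_backlog_bottleneck_py first_sqs_backlog_bottleneck_py first_sqs_backlog_bottleneck_py_alt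
  cases h : risks.foldl pvStep none with
  | none =>
    have hall := F_none h
    have c0 : "messages_available_but_no_lambda_mapping" ∉ risks := fun hm => by
      have g := pvG0; rw [hall _ hm] at g; cases g
    have c1 : "event_source_mapping_not_enabled" ∉ risks := fun hm => by
      have g := pvG1; rw [hall _ hm] at g; cases g
    have c2 : "lambda_throttles_observed" ∉ risks := fun hm => by
      have g := pvG2; rw [hall _ hm] at g; cases g
    have c3 : "visibility_timeout_too_low_for_lambda_timeout" ∉ risks := fun hm => by
      have g := pvG3; rw [hall _ hm] at g; cases g
    have c4 : "oldest_message_age_high" ∉ risks := fun hm => by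
      have g := pvG4; rw [hall _ hm] at g; cases g
    have c5 : "partial_batch_response_not_enabled" ∉ risks := fun hm => by
      have g := pvG5; rw [hall _ hm] at g; cases g
    have c6 : "queue_redrive_not_configured" ∉ risks := fun hm => by
      have g := pvG6; rw [hall _ hm] at g; cases g
    simp [pvLoopA, pvPriority, PySem.Set.mem_ofList, c0, c1, c2, c3, c4, c5, c6]
  | some j =>
    obtain ⟨⟨r, hr, hrk⟩, hmin⟩ := F_min h
    show pvLoopA (PySem.Set.ofList risks) risks pvPriority = PySem.List.pyGet? pvPriority (j : Int)
    rcases pvRank_cases hrk with ⟨rfl, rfl⟩ | ⟨rfl, rfl⟩ | ⟨rfl, rfl⟩ | ⟨rfl, rfl⟩ | ⟨rfl, rfl⟩ | ⟨rfl, rfl⟩ | ⟨rfl, rfl⟩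
    · -- j = 0
      rw [pvP0]
      simp [pvLoopA, pvPriority, PySem.Set.mem_ofList, hr]
    · -- j = 1
      have n0 : "messages_available_but_no_lambda_mapping" ∉ risks := fun hm => by
        have := hmin _ hm 0 pvG0; omega
      rw [pvP1]
      simp [pvLoopA, pvPriority, PySem.Set.mem_ofList, hr, n0]
    · -- j = 2
      have n0 : "messages_available_but_no_lambda_mapping" ∉ risks := fun hm => by
        have := hmin _ hm 0 pvG0; omega
      have n1 : "event_source_mapping_not_enabled" ∉ risks := fun hm => by
        have := hmin _ hm 1 pvG1; omega
      rw [pvP2]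
      simp [pvLoopA, pvPriority, PySem.Set.mem_ofList, hr, n0, n1]
    · -- j = 3
      have n0 : "messages_available_but_no_lambda_mapping" ∉ risks := fun hm => by
        have := hmin _ hm 0 pvG0; omega
      have n1 : "event_source_mapping_not_enabled" ∉ risks := fun hm => by
        have := hmin _ hm 1 pvG1; omega
      have n2 : "lambda_throttles_observed" ∉ risks := fun hm => by
        have := hmin _ hm 2 pvG2; omega
      rw [pvP3]
      simp [pvLoopA, pvPriority, PySem.Set.mem_ofList, hr, n0, n1, n2]
    · -- j = 4
      have n0 : "messages_available_but_no_lambda_mapping" ∉ risks := fun hm => by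
        have := hmin _ hm 0 pvG0; omega
      have n1 : "event_source_mapping_not_enabled" ∉ risks := fun hm => by
        have := hmin _ hm 1 pvG1; omega
      have n2 : "lambda_throttles_observed" ∉ risks := fun hm => by
        have := hmin _ hm 2 pvG2; omega
      have n3 : "visibility_timeout_too_low_for_lambda_timeout" ∉ risks := fun hm => by
        have := hmin _ hm 3 pvG3; omega
      rw [pvP4]
      simp [pvLoopA, pvPriority, PySem.Set.mem_ofList, hr, n0, n1, n2, n3]
    · -- j = 5
      have n0 : "messages_available_but_no_lambda_mapping" ∉ risks := fun hm => by
        have := hmin _ hm 0 pvG0; omega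
      have n1 : "event_source_mapping_not_enabled" ∉ risks := fun hm => by
        have := hmin _ hm 1 pvG1; omega
      have n2 : "lambda_throttles_observed" ∉ risks := fun hm => by
        have := hmin _ hm 2 pvG2; omega
      have n3 : "visibility_timeout_too_low_for_lambda_timeout" ∉ risks := fun hm => by
        have := hmin _ hm 3 pvG3; omega
      have n4 : "oldest_message_age_high" ∉ risks := fun hm => by
        have := hmin _ hm 4 pvG4; omega
      rw [pvP5]
      simp [pvLoopA, pvPriority, PySem.Set.mem_ofList, hr, n0, n1, n2, n3, n4]
    · -- j = 6
      have n0 : "messages_available_but_no_lambda_mapping" ∉ risks := fun hm => by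
        have := hmin _ hm 0 pvG0; omega
      have n1 : "event_source_mapping_not_enabled" ∉ risks := fun hm => by
        have := hmin _ hm 1 pvG1; omega
      have n2 : "lambda_throttles_observed" ∉ risks := fun hm => by
        have := hmin _ hm 2 pvG2; omega
      have n3 : "visibility_timeout_too_low_for_lambda_timeout" ∉ risks := fun hm => by
        have := hmin _ hm 3 pvG3; omega
      have n4 : "oldest_message_age_high" ∉ risks := fun hm => by
        have := hmin _ hm 4 pvG4; omega
      have n5 : "partial_batch_response_not_enabled" ∉ risks := fun hm => by
        have := hmin _ hm 5 pvG5; omega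
      rw [pvP6]
      simp [pvLoopA, pvPriority, PySem.Set.mem_ofList, hr, n0, n1, n2, n3, n4, n5]
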